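-- pv_equiv track=rewrite | github.com/Keashyn/CP1404-Assignment-2 | placecollection.py | check_symbol
-- ===== SOURCE A (Python) =====
-- def check_symbol(user_input):
--     """This method is used for checking  if there is symbol in the user input"""
--     data = list(user_input)
--     """The data gotten from the user input will be putted  into the list"""
--     counter = 0
--     """This variable is used for counting how many symbols"""
--     for i in data:
--         """This loop is used  for checking  if its include with symbol or not"""
--         SPECIAL_CHARACTERS = "!@#$%^&*()_-=+`~,./'[]<>?{}|\\"
--         if i in SPECIAL_CHARACTERS:
--             """With this loop it will check every data if its included with the symbol or not , if so it will add counter with 1"""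
--             counter += 1
--         else:
--             """else it will keep the value of the counter"""
--             counter = counter
--     if counter > 0:
--         """if counter is more than 0 or there is symbol in the user input it will results to False"""
--         return False
--     else:
--         """else if there is no number it will return True and passess the values"""
--         return True
-- ===== SOURCE B (Python) =====
-- SPECIAL_CHARACTERS = "!@#$%^&*()_-=+`~,./'[]<>?{}|\\"
--
--
-- def check_symbol(user_input):
--     """True iff no special character occurs in the input.
--
--     Inverted traversal: instead of scanning the input and counting hits
--     against the table, scan the TABLE and substring-test each special
--     character against the input, bailing out at the first one found.
--     """
--     for ch in SPECIAL_CHARACTERS: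
--         if ch in user_input:
--             return False
--     return True
-- ===== Notes on version B (the rewrite author's own statement) =====
-- stated objective: faster
-- what changed: Inverts the traversal: instead of looping over the input characters, counting matches against the table and branching on the counter at the end, B loops over the special-character table, substring-tests each special character against the whole input (C-level str 'in') and returns False at the first hit (no counter, early exit).
import Mathlib
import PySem

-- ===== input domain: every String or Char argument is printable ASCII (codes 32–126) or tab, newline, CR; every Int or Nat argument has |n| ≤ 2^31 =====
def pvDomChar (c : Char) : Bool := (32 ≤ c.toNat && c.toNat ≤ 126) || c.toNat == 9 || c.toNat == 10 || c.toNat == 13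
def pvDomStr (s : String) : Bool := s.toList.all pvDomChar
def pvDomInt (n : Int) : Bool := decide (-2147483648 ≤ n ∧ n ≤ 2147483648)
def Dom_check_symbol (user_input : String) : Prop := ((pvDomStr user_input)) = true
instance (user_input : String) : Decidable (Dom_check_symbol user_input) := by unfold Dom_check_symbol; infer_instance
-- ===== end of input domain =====

-- B inverts the traversal (loop over the table with early exit, no counter); same result, same cost class.

-- ===== PORT A =====
-- SPECIAL_CHARACTERS = "!@#$%^&*()_-=+`~,./'[]<>?{}|\\"
def pvSpecial : List Char := ['!','@','#','$','%','^','&','*','(',')','_','-','=','+','`','~',',','.','/','\'','[',']','<','>','?','{','}','|','\\']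

def check_symbol (user_input : String) : Bool :=
  let data := user_input.toList
  let counter : Int := data.foldl
    (fun counter i => if pvSpecial.contains i then counter + 1 else counter) 0
  if counter > 0 then false else true

-- ===== PORT B =====
-- for ch in SPECIAL_CHARACTERS: if ch in user_input: return False / return True
-- early-exit loop over the table, ported as structural recursion on the table
def pvScanTable (table : List Char) (input : List Char) : Bool :=
  match table with
  | [] => true
  | ch :: rest => if ch ∈ input then false else pvScanTable rest input

def check_symbol_alt (user_input : String) : Bool :=
  pvScanTable pvSpecial user_input.toList

-- ===== PRECONDITION & SPEC =====
def Spec_check_symbol (user_input : String) (out : Bool) : Prop := out = check_symbol_alt user_input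
instance (user_input : String) (out : Bool) : Decidable (Spec_check_symbol user_input out) := by unfold Spec_check_symbol; infer_instance

-- ===== CLAIM =====
def Claim_equal_check_symbol : Prop := ∀ (user_input : String), Dom_check_symbol user_input → Spec_check_symbol user_input (check_symbol user_input)

-- ===== LEMMAS AND PROOFS =====

-- B's table scan is true iff no table character occurs in the input
theorem pvScanTable_eq (t input : List Char) :
    pvScanTable t input = !(t.any (fun ch => input.contains ch)) := by
  induction t with
  | nil => simp [pvScanTable]
  | cons c r ih => by_cases h : c ∈ input <;> simp [pvScanTable, h, ih]

-- A's counter after the fold = start + number of special characters seen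
theorem pv_counter (l : List Char) (n : Int) :
    l.foldl (fun counter i => if pvSpecial.contains i then counter + 1 else counter) n
      = n + (l.filter (fun i => pvSpecial.contains i)).length := by
  induction l generalizing n with
  | nil => simp
  | cons c t ih =>
    simp only [List.foldl_cons, List.filter_cons]
    rw [ih]
    by_cases h : c ∈ pvSpecial
    · simp [h]; ring
    · simp [h]

-- ===== VERDICT =====
theorem check_symbol_spec : Claim_equal_check_symbol := by
  intro s _
  unfold Spec_check_symbol check_symbol check_symbol_alt
  simp only [pv_counter, zero_add, pvScanTable_eq]
  by_cases h : ∃ c ∈ pvSpecial, c ∈ s.toList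
  · obtain ⟨c, hc1, hc2⟩ := h
    have hm : c ∈ s.toList.filter (fun i => pvSpecial.contains i) := by
      simp [List.mem_filter, hc1, hc2]
    have hp := List.length_pos_of_mem hm
    rw [if_pos (by exact_mod_cast hp)]
    simp [List.any_eq_true]
    exact ⟨c, hc1, hc2⟩
  · push_neg at h
    have hfil : s.toList.filter (fun i => pvSpecial.contains i) = [] := by
      rw [List.filter_eq_nil_iff]
      intro c hc hsp
      exact h c (by simpa using hsp) hc
    rw [hfil]
    simp [List.any_eq_true]
    intro c hc hmem
    exact h c hc hmem
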